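-- pv_equiv track=rewrite | github.com/Ryeong-j/Programmers_Codingtest | 프로그래머스/0/181855. 문자열 묶기/문자열 묶기.py | solution
-- ===== SOURCE A (Python) =====
-- def solution(strArr):
--     counter = {}
--     for s in strArr:
--         l = len(s)
--         if l in counter:
--             counter[l] += 1
--         else:
--             counter[l] = 1
--     if not counter:  # 빈 리스트 처리
--         return 0
--     return max(counter.values())
-- ===== SOURCE B (Python) =====
-- def solution(strArr):
--     best = 0
--     for s in strArr:
--         c = 0
--         for t in strArr:
--             if len(t) == len(s):
--                 c += 1
--         if c > best:
--             best = c
--     return best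
-- ===== Notes on version B (the rewrite author's own statement) =====
-- stated objective: alternative
-- what changed: Replaces the frequency-dictionary build plus max over its values by plain nested loops: for each string count how many strings share its length and keep the running maximum, with no dictionary and no separate empty-list branch.
import Mathlib
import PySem

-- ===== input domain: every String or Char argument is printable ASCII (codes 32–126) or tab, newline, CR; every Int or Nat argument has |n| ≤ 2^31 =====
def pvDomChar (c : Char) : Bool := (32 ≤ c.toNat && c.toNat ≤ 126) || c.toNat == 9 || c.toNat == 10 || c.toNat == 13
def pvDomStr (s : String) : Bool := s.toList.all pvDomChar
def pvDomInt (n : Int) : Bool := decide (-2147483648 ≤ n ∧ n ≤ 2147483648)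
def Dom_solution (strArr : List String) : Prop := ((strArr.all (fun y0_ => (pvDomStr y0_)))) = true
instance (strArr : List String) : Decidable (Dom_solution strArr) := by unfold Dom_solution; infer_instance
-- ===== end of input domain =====

-- B replaces A's frequency-dictionary build + max over its values by nested counting loops with a running maximum (alternative decomposition, not faster).

-- ===== PORT A =====
def solution (strArr : List String) : Int :=
  let counter : PySem.Dict Int Int :=
    strArr.foldl (fun d s =>
      let l := PySem.Str.len s
      if d.contains l then d.insert l (d.getD l 0 + 1) else d.insert l 1)
      PySem.Dict.empty
  if counter.size = 0 then 0
  else ((PySem.List.max? counter.values (fun v => v)).getD 0)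
  -- 'max(counter.values())': the .getD 0 default is never reached — counter is nonempty on this branch, so max? is some _

-- ===== PORT B =====
def solution_alt (strArr : List String) : Int :=
  strArr.foldl (fun best s =>
    let c : Int := strArr.foldl (fun c t =>
      if PySem.Str.len t = PySem.Str.len s then c + 1 else c) 0
    if c > best then c else best) 0

-- ===== PRECONDITION & SPEC =====
def Spec_solution (strArr : List String) (out : Int) : Prop := out = solution_alt strArr
instance (strArr : List String) (out : Int) : Decidable (Spec_solution strArr out) := by unfold Spec_solution; infer_instance

-- ===== CLAIM (what is proved, stated in full; the proofs are below) =====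
def Claim_equal_solution : Prop := ∀ (strArr : List String), Dom_solution strArr → Spec_solution strArr (solution strArr)

-- ===== LEMMAS AND PROOFS =====

-- B's inner loop counts the strings sharing s's length
theorem solution_inner_count (strArr : List String) (s : String) :
    strArr.foldl (fun c t => if PySem.Str.len t = PySem.Str.len s then c + 1 else c) 0
    = ((strArr.map PySem.Str.len).count (PySem.Str.len s) : Int) := by
  rw [PySem.List.foldl_ite_add_one]
  simp only [List.count, List.countP_map, zero_add, Int.natCast_inj]
  apply List.countP_congr
  intro x _
  simp [PySem.Str.len]

-- A's dictionary loop builds exactly Counter(lengths)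
theorem solution_counter_eq (strArr : List String) :
    strArr.foldl (fun d s =>
      let l := PySem.Str.len s
      if d.contains l then d.insert l (d.getD l 0 + 1) else d.insert l 1)
      PySem.Dict.empty
    = PySem.Dict.counter (strArr.map PySem.Str.len) := by
  rw [← PySem.Dict.foldl_insert_getD_add_one_eq_counter, List.foldl_map]
  apply PySem.List.foldl_congr_mem
  intro d s _
  by_cases h : d.contains (PySem.Str.len s)
  · simp only [h, if_true]
  · simp only [h, Bool.false_eq_true, if_false,
      PySem.Dict.getD_of_not_contains d 0 ((Bool.not_eq_true _).mp h)]
    simp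

-- the three facts about B's running-maximum-of-a-projection fold
theorem solution_foldmax_facts {α : Type} (f : α → Int) (xs : List α) (i : Int) :
    i ≤ xs.foldl (fun b x => if f x > b then f x else b) i ∧
    (∀ x ∈ xs, f x ≤ xs.foldl (fun b x => if f x > b then f x else b) i) ∧
    (xs.foldl (fun b x => if f x > b then f x else b) i = i ∨
      ∃ x ∈ xs, xs.foldl (fun b x => if f x > b then f x else b) i = f x) := by
  induction xs generalizing i with
  | nil => simp
  | cons y t ih =>
    simp only [List.foldl_cons]
    by_cases hy : f y > i
    · simp only [if_pos hy]
      obtain ⟨h1, h2, h3⟩ := ih (f y)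
      refine ⟨by omega, ?_, ?_⟩
      · intro x hx
        rcases List.mem_cons.mp hx with rfl | hx
        · exact h1
        · exact h2 x hx
      · rcases h3 with h3 | ⟨x, hx, hfx⟩
        · exact Or.inr ⟨y, List.mem_cons_self, h3⟩
        · exact Or.inr ⟨x, List.mem_cons_of_mem _ hx, hfx⟩
    · simp only [if_neg hy]
      obtain ⟨h1, h2, h3⟩ := ih i
      refine ⟨h1, ?_, ?_⟩
      · intro x hx
        rcases List.mem_cons.mp hx with rfl | hx
        · omega
        · exact h2 x hx
      · rcases h3 with h3 | ⟨x, hx, hfx⟩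
        · exact Or.inl h3
        · exact Or.inr ⟨x, List.mem_cons_of_mem _ hx, hfx⟩

theorem solution_main_eq (strArr : List String) : solution strArr = solution_alt strArr := by
  have hBfn : solution_alt strArr
      = strArr.foldl (fun b s =>
          if ((strArr.map PySem.Str.len).count (PySem.Str.len s) : Int) > b
          then ((strArr.map PySem.Str.len).count (PySem.Str.len s) : Int) else b) 0 := by
    unfold solution_alt
    apply PySem.List.foldl_congr_mem
    intro b s _
    simp only [solution_inner_count strArr s]
  cases hArr : strArr with
  | nil => simp [solution, solution_alt]
  | cons s0 rest =>
    rw [← hArr]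
    set L := strArr.map PySem.Str.len with hL
    -- A's value: the maximum of the counter's values
    have hC : solution strArr
        = if (PySem.Dict.counter L).size = 0 then 0
          else ((PySem.List.max? (PySem.Dict.counter L).values (fun v => v)).getD 0) := by
      unfold solution
      rw [solution_counter_eq]
    have hLne : L ≠ [] := by
      rw [hL]; simp [hArr]
    have hvals : (PySem.Dict.counter L).values
        = (PySem.Set.ofList L).map (fun k => ((L.count k : Int))) := by
      simp only [PySem.Dict.values, PySem.Dict.items_counter, List.map_map]
      rfl
    have hOfLne : PySem.Set.ofList L ≠ [] := by
      obtain ⟨a, ha⟩ : ∃ a, a ∈ L := by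
        match hq : L, hLne with
        | a :: t, _ => exact ⟨a, by simp⟩
      intro h
      have := (PySem.Set.mem_ofList L a).mpr ha
      rw [h] at this
      simp at this
    have hvne : (PySem.Dict.counter L).values ≠ [] := by
      rw [hvals]; simpa using hOfLne
    have hsize : (PySem.Dict.counter L).size ≠ 0 := by
      have : (PySem.Dict.counter L).values.length = (PySem.Dict.counter L).size := by
        simp [PySem.Dict.values, PySem.Dict.size]
      intro h0
      apply hvne
      rw [← List.length_eq_zero_iff, this, h0]
    obtain ⟨m, hm⟩ : ∃ m, PySem.List.max? (PySem.Dict.counter L).values (fun v => v) = some m := by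
      cases hq : PySem.List.max? (PySem.Dict.counter L).values (fun v => v) with
      | none => exact absurd ((PySem.List.max?_eq_none_iff _ _).mp hq) hvne
      | some m => exact ⟨m, rfl⟩
    have hA : solution strArr = m := by rw [hC, if_neg hsize, hm]; rfl
    -- B's value: the running maximum over the per-string counts
    set f : String → Int := fun s => ((L.count (PySem.Str.len s) : Int)) with hf
    obtain ⟨h1, h2, h3⟩ := solution_foldmax_facts f strArr 0
    have hB : solution_alt strArr = strArr.foldl (fun b x => if f x > b then f x else b) 0 := hBfn
    set R := strArr.foldl (fun b x => if f x > b then f x else b) 0 with hR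
    -- m ≤ R: the maximal counter value is the count of some occurring length
    have hmem := PySem.List.max?_mem hm
    rw [hvals] at hmem
    obtain ⟨k, hk, hkm⟩ := List.mem_map.mp hmem
    have hkL : k ∈ L := (PySem.Set.mem_ofList _ _).mp hk
    obtain ⟨t, htmem, htk⟩ := List.mem_map.mp hkL
    have hft : f t = m := by
      rw [hf]
      simp only [htk]
      exact hkm
    have hmR : m ≤ R := hft ▸ h2 t htmem
    -- R ≤ m: B's result is one of the counter's values (or 0, excluded)
    have hRm : R ≤ m := by
      rcases h3 with h0 | ⟨x, hxmem, hxval⟩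
      · have hcnt : 1 ≤ L.count k := List.one_le_count_iff.mpr hkL
        have hcm : (1 : Int) ≤ m := by rw [← hkm]; exact_mod_cast hcnt
        omega
      · have hxL : PySem.Str.len x ∈ L := by
          rw [hL]; exact List.mem_map_of_mem hxmem
        have hxS : PySem.Str.len x ∈ PySem.Set.ofList L := (PySem.Set.mem_ofList _ _).mpr hxL
        have hv : ((L.count (PySem.Str.len x) : Int)) ∈ (PySem.Dict.counter L).values := by
          rw [hvals]
          exact List.mem_map_of_mem hxS
        have := PySem.List.max?_isMax hm _ hv
        rw [hxval, hf]
        exact this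
    rw [hA, hB]
    omega

-- ===== VERDICT (by name: the statement is the Claim_ definition above) =====
theorem solution_spec : Claim_equal_solution := by
  intro strArr _
  unfold Spec_solution
  exact solution_main_eq strArr
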